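-- pv_equiv track=rewrite | github.com/RyuYS-17/programmers | Lv2/skilltree.py | solution
-- ===== SOURCE A (Python) =====
-- def make_priority(skill):
--     temp = []
--     for i in range(len(skill)):
--         temp.append(skill[i])
--     return temp
--
-- def check_priority(skill_tree, skill_priority):
--     temp = []
--     for i in range(len(skill_tree)):
--         if skill_tree[i] in skill_priority: temp.append(skill_tree[i])
--     return temp
--
-- def compare_skilltree(checklist, skill_priority):
--     for i in range(len(checklist)):
--         if skill_priority[i] != checklist[i]:
--             return False
--     return True
--
-- def solution(skill, skill_trees):
--     answer = 0
--     skill_priority = make_priority(skill)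
--     for skill_tree in skill_trees:
--         checklist = check_priority(skill_tree, skill_priority)
--         if (compare_skilltree(checklist, skill_priority)):
--             answer += 1
--     return answer
-- ===== SOURCE B (Python) =====
-- def solution(skill, skill_trees):
--     # One pass per tree with a position pointer into skill; no filtered checklist is built.
--     n = len(skill)
--     count = 0
--     for tree in skill_trees:
--         idx = 0
--         ok = True
--         for c in tree:
--             if c in skill:
--                 if idx == n or c != skill[idx]:
--                     ok = False
--                     break
--                 idx += 1
--         if ok:
--             count += 1
--     return count
-- ===== Notes on version B (the rewrite author's own statement) =====
-- stated objective: simpler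
-- what changed: Replaces the three-helper pipeline (materialise skill as a list, build a filtered checklist per tree, then compare it index-by-index against the priority list) with a single pass per tree that keeps only a position pointer into skill, allocating no intermediate lists and failing fast on the first out-of-order skill character. (On inputs excluded by Pre_, where A raises IndexError, B rejects the offending tree and returns the count of the valid ones.)
-- outside the precondition, e.g. on solution('C', ['CC']): A raises IndexError, B returns 0
import Mathlib
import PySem

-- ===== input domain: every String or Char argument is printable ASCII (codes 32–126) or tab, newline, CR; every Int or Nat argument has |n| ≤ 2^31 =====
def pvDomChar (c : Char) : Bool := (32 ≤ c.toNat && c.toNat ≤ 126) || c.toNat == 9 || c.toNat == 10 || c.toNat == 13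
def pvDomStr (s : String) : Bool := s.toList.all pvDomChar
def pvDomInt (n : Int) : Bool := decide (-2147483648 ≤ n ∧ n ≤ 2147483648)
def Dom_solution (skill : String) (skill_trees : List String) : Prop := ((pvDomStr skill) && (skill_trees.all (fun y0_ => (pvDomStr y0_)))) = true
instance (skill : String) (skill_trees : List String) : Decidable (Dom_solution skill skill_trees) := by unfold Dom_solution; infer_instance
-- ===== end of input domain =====

-- B replaces A's three-helper pipeline (priority list, filtered checklist, index-wise compare)
-- with a single pass per tree holding only a position pointer into skill — simpler, no intermediate lists.

-- ===== PORT A =====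
-- make_priority: for i in range(len(skill)): temp.append(skill[i])
def makePriority (skill : List Char) : List Char :=
  (PySem.List.pyRange 0 (skill.length : Int) 1).foldl
    (fun temp i => temp ++ [PySem.List.pyGetD skill i ' ']) []

-- check_priority: for i in range(len(skill_tree)): if skill_tree[i] in skill_priority: temp.append(skill_tree[i])
def checkPriority (tree prio : List Char) : List Char :=
  (PySem.List.pyRange 0 (tree.length : Int) 1).foldl
    (fun temp i => if PySem.List.pyGetD tree i ' ' ∈ prio then temp ++ [PySem.List.pyGetD tree i ' '] else temp) []

-- compare_skilltree: for i in range(len(checklist)): if skill_priority[i] != checklist[i]: return False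
-- (the out-of-range access skill_priority[i] — a Python IndexError — is excluded by Pre_solution; pyGetD's default is never the value)
def compareGo (checklist prio : List Char) (i : Nat) : Bool :=
  if _h : i < checklist.length then
    if PySem.List.pyGetD prio (i : Int) ' ' ≠ PySem.List.pyGetD checklist (i : Int) ' ' then false
    else compareGo checklist prio (i + 1)
  else true
termination_by checklist.length - i

def compareSkilltree (checklist prio : List Char) : Bool := compareGo checklist prio 0

def solution (skill : String) (skill_trees : List String) : Int :=
  let skill_priority := makePriority skill.toList
  skill_trees.foldl
    (fun answer skill_tree =>
      if compareSkilltree (checkPriority skill_tree.toList skill_priority) skill_priority then answer + 1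
      else answer) 0

-- ===== PORT B =====
-- inner loop of Source B: for c in tree: if c in skill: if idx == n or c != skill[idx]: break(fail) else idx += 1
-- ('c in skill' for a single character c is exactly character membership in skill)
def altScan (skill : List Char) (n : Nat) : List Char → Nat → Bool
  | [], _ => true
  | c :: rest, idx =>
    if c ∈ skill then
      if idx = n ∨ c ≠ skill.getD idx ' ' then false
      else altScan skill n rest (idx + 1)
    else altScan skill n rest idx

def solution_alt (skill : String) (skill_trees : List String) : Int :=
  skill_trees.foldl
    (fun count tree =>
      if altScan skill.toList skill.toList.length tree.toList 0 then count + 1 else count) 0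

-- ===== PRECONDITION & SPEC =====
-- Pre_ excludes exactly the inputs where A raises IndexError: a tree whose skill-characters,
-- in order, contain the whole of skill as a proper prefix (compare_skilltree then indexes
-- skill_priority past its end). A returns normally on every other input.
def Pre_solution (skill : String) (skill_trees : List String) : Prop :=
  ∀ t ∈ skill_trees,
    ¬ (skill.toList <+: t.toList.filter (· ∈ skill.toList) ∧
       skill.toList.length < (t.toList.filter (· ∈ skill.toList)).length)
instance (skill : String) (skill_trees : List String) : Decidable (Pre_solution skill skill_trees) := by
  unfold Pre_solution; infer_instance

def pvWitness_solution : String × List String := ("CBD", ["BACDE", "CBADF", "AECB", "BDA"])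

def Spec_solution (skill : String) (skill_trees : List String) (out : Int) : Prop := out = solution_alt skill skill_trees
instance (skill : String) (skill_trees : List String) (out : Int) : Decidable (Spec_solution skill skill_trees out) := by unfold Spec_solution; infer_instance

-- ===== CLAIM (what is proved, stated in full; the proofs are below) =====
def Claim_equal_solution : Prop := ∀ (skill : String) (skill_trees : List String), Dom_solution skill skill_trees → Pre_solution skill skill_trees → Spec_solution skill skill_trees (solution skill skill_trees)

-- ===== LEMMAS AND PROOFS =====

lemma makePriority_eq (skill : List Char) : makePriority skill = skill := by
  unfold makePriority
  rw [PySem.List.foldl_pyRange_zero_pyGetD' skill ' ' (fun temp c => temp ++ [c]) [],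
      PySem.List.foldl_append_singleton_eq_self]
  simp

lemma checkPriority_eq (tree prio : List Char) :
    checkPriority tree prio = tree.filter (· ∈ prio) := by
  unfold checkPriority
  rw [PySem.List.foldl_pyRange_zero_pyGetD' tree ' '
        (fun temp c => if c ∈ prio then temp ++ [c] else temp) [],
      PySem.List.foldl_append_ite_eq_filter]
  simp

lemma altScan_eq (prio : List Char) (cs : List Char) :
    ∀ idx, idx ≤ prio.length →
      altScan prio prio.length cs idx = decide (cs.filter (· ∈ prio) <+: prio.drop idx) := by
  induction cs with
  | nil => intro idx _; simp [altScan]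
  | cons c rest ih =>
    intro idx hidx
    by_cases hc : c ∈ prio
    · by_cases hn : idx = prio.length
      · subst hn
        have hstep : altScan prio prio.length (c :: rest) prio.length = false := by
          simp [altScan, hc]
        rw [hstep, List.drop_length, List.filter_cons_of_pos (by simpa using hc)]
        simp
      · have hlt : idx < prio.length := lt_of_le_of_ne hidx hn
        have hdrop : prio.drop idx = prio[idx] :: prio.drop (idx + 1) :=
          List.drop_eq_getElem_cons hlt
        have hg : prio.getD idx ' ' = prio[idx] := by
          simp [List.getD, List.getElem?_eq_getElem hlt]
        by_cases hm : c = prio[idx]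
        · have hstep : altScan prio prio.length (c :: rest) idx
              = altScan prio prio.length rest (idx + 1) := by
            simp only [altScan, if_pos hc, hg]
            rw [if_neg]
            rintro (h | h)
            · exact hn h
            · exact h hm
          rw [hstep, ih (idx + 1) hlt, hdrop,
              List.filter_cons_of_pos (by simpa using hc), hm]
          simp only [List.cons_prefix_cons]
          simp
        · have hstep : altScan prio prio.length (c :: rest) idx = false := by
            simp only [altScan, if_pos hc, hg]
            rw [if_pos (Or.inr hm)]
          have hnp : ¬ (c :: rest.filter (· ∈ prio) <+: prio[idx] :: prio.drop (idx + 1)) := by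
            rw [List.cons_prefix_cons]
            rintro ⟨h1, -⟩
            exact hm h1
          rw [hstep, hdrop, List.filter_cons_of_pos (by simpa using hc)]
          exact (decide_eq_false hnp).symm
    · have hstep : altScan prio prio.length (c :: rest) idx
          = altScan prio prio.length rest idx := by
        simp [altScan, hc]
      rw [hstep, ih idx hidx, List.filter_cons_of_neg (by simpa using hc)]

lemma compareGo_eq (cl pr : List Char) :
    ∀ i, ¬ (pr.drop i <+: cl.drop i ∧ pr.length - i < cl.length - i) →
      compareGo cl pr i = decide (cl.drop i <+: pr.drop i) := by
  intro i
  induction hn : cl.length - i using Nat.strong_induction_on generalizing i with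
  | _ n ih =>
    intro H
    by_cases hcl : i < cl.length
    · have hpr : i < pr.length := by
        by_contra hge
        exact H ⟨by simp [List.drop_eq_nil_of_le (le_of_not_gt hge)], by omega⟩
      have hdc : cl.drop i = cl[i] :: cl.drop (i + 1) := List.drop_eq_getElem_cons hcl
      have hdp : pr.drop i = pr[i] :: pr.drop (i + 1) := List.drop_eq_getElem_cons hpr
      have hgc : PySem.List.pyGetD cl (i : Int) ' ' = cl[i] := by
        simp [PySem.List.pyGetD_natCast, List.getD, List.getElem?_eq_getElem hcl]
      have hgp : PySem.List.pyGetD pr (i : Int) ' ' = pr[i] := by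
        simp [PySem.List.pyGetD_natCast, List.getD, List.getElem?_eq_getElem hpr]
      by_cases hm : pr[i] = cl[i]
      · have hstep : compareGo cl pr i = compareGo cl pr (i + 1) := by
          rw [compareGo]; simp [hcl, hgc, hgp, hm]
        have H' : ¬ (pr.drop (i + 1) <+: cl.drop (i + 1) ∧
            pr.length - (i + 1) < cl.length - (i + 1)) := by
          rintro ⟨hpre, hlen⟩
          exact H ⟨by rw [hdc, hdp, hm]; exact List.cons_prefix_cons.mpr ⟨rfl, hpre⟩, by omega⟩
        rw [hstep, ih (cl.length - (i + 1)) (by omega) (i + 1) rfl H', hdc, hdp, hm]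
        simp only [List.cons_prefix_cons]
        simp
      · have hstep : compareGo cl pr i = false := by
          rw [compareGo]; simp [hcl, hgc, hgp, hm]
        have hnp : ¬ (cl[i] :: cl.drop (i + 1) <+: pr[i] :: pr.drop (i + 1)) := by
          rw [List.cons_prefix_cons]
          rintro ⟨h1, -⟩
          exact hm h1.symm
        rw [hstep, hdc, hdp]
        exact (decide_eq_false hnp).symm
    · have hstep : compareGo cl pr i = true := by rw [compareGo]; simp [hcl]
      rw [hstep, List.drop_eq_nil_of_le (le_of_not_gt hcl)]
      simp

lemma per_tree_eq (skill : List Char) (t : List Char)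
    (H : ¬ (skill <+: t.filter (· ∈ skill) ∧ skill.length < (t.filter (· ∈ skill)).length)) :
    compareSkilltree (checkPriority t skill) skill = altScan skill skill.length t 0 := by
  rw [checkPriority_eq, altScan_eq skill t 0 (Nat.zero_le _)]
  unfold compareSkilltree
  rw [compareGo_eq (t.filter (· ∈ skill)) skill 0 (by simpa using H)]
  simp

-- ===== VERDICT (by name: the statement is the Claim_ definition above) =====
theorem solution_spec : Claim_equal_solution := by
  intro skill skill_trees _hdom hpre
  unfold Spec_solution solution solution_alt
  rw [makePriority_eq]
  show List.foldl
      (fun answer skill_tree =>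
        if compareSkilltree (checkPriority skill_tree.toList skill.toList) skill.toList = true
        then answer + 1 else answer) 0 skill_trees = _
  refine PySem.List.foldl_congr_mem' _ _ _ _ ?_
  intro t ht answer
  rw [per_tree_eq skill.toList t.toList (hpre t ht)]
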